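-- pv_equiv track=rewrite | github.com/CoderOJ/contests | XJOI/1738/A/main.py | solve
-- ===== SOURCE A (Python) =====
-- def get(n,d):
--     return str(d) + "*" + str(n) + "=" + str(n*d)
--
-- def getMulLen(n,d):
--     base,l,res = 1,1,0
--     while True:
--         low,upp = base-1, min(base*10-1, n*d)
--         res += (upp // d - low // d) * l
--         base *= 10
--         l += 1
--         if base > n*d:
--             break
--     return res
--
-- def getLenBef(n,d):
--     trash = 3*n-1 + len(str(d)) * n
--     return trash + getMulLen(n,1) + getMulLen(n,d)
--
-- def getAns(d,le):
--     l,r = 1,1024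
--     while getLenBef(r,d) < le:
--         l,r = l*1024, r*1024
--     while l<r:
--         mid = (l+r)//2
--         if getLenBef(mid,d) >= le:
--             r = mid
--         else:
--             l = mid+1
--     return l
--
-- def solve(d,pre,le):
--     s = getAns(d,pre)
--     pos = pre -  getLenBef(s-1,d) - 1
--     ans = ""
--     while len(ans) < le+pos:
--         ans = ans + get(s,d) + " "
--         s += 1
--     return ans[pos:le+pos]
-- ===== SOURCE B (Python) =====
-- def get(n, d):
--     return str(d) + "*" + str(n) + "=" + str(n * d)
--
--
-- def solve(d, pre, le):
--     # Forward scan over the multiplication-table blocks, jumping over whole runs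
--     # of blocks of equal length that lie before the requested window, then
--     # building just the window's characters and slicing.
--     n = 1
--     skipped = 0
--     while True:
--         a = len(str(n))
--         b = len(str(n * d))
--         bl = len(str(d)) + a + b + 3
--         run = min(10 ** a - 1, (10 ** b - 1) // d)
--         jump = min(run - n + 1, (pre - skipped) // bl)
--         if jump <= 0:
--             break
--         n += jump
--         skipped += jump * bl
--     s = ""
--     while skipped + len(s) < pre + le:
--         s = s + get(n, d) + " "
--         n = n + 1
--     return s[pre - skipped:pre + le - skipped]
-- ===== Notes on version B (the rewrite author's own statement) =====
-- stated objective: alternative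
-- what changed: Drops the digit-counting length formulas (getMulLen/getLenBef), the galloping search and the binary search for the target block; instead one forward scan jumps over whole runs of equal-length blocks (tracking only the skipped character count) and then builds just the window's characters.
-- outside the precondition, e.g. on solve(-72, 32, 24): A returns '-72*5=-360 -72*6=-432 -7', B returns '-72*4=-288 -72*5=-360 -7'
import Mathlib
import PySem

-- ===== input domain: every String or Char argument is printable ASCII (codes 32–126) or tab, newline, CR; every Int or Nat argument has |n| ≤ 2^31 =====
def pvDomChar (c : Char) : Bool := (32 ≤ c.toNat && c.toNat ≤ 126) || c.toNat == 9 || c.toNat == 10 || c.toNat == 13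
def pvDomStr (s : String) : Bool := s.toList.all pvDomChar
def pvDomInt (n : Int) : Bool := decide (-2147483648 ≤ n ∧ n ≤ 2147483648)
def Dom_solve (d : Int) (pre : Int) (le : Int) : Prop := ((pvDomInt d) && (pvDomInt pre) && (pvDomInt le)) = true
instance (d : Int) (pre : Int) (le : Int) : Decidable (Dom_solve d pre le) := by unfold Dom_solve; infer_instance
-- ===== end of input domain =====

-- B replaces A's digit-count formulas, galloping search and binary search by one forward
-- scan building the sequence from n=1; same return value on the stated domain (no speedup claimed).

-- ===== PORT A =====
def getA (n d : Int) : String :=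
  PySem.Int.toStr d ++ "*" ++ PySem.Int.toStr n ++ "=" ++ PySem.Int.toStr (n * d)

-- 'while True: … if base > n*d: break' — fuel only bounds the iteration count (the fuel is ample; the loop exits by its own break)
def getMulLenLoop (nd d : Int) : Nat → Int → Int → Int → Int
  | 0, _, _, res => res
  | fuel+1, base, l, res =>
    let low := base - 1
    let upp := min (base * 10 - 1) nd
    let res' := res + (PySem.Int.floordiv upp d - PySem.Int.floordiv low d) * l
    let base' := base * 10
    if base' > nd then res' else getMulLenLoop nd d fuel base' (l + 1) res'

def getMulLen (n d : Int) : Int := getMulLenLoop (n * d) d ((n * d).toNat + 1) 1 1 0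

def getLenBef (n d : Int) : Int :=
  let trash := 3 * n - 1 + PySem.Str.len (PySem.Int.toStr d) * n
  trash + getMulLen n 1 + getMulLen n d

def getAnsGallop (d le : Int) : Nat → Int → Int → Int × Int
  | 0, l, r => (l, r)
  | fuel+1, l, r => if getLenBef r d < le then getAnsGallop d le fuel (l * 1024) (r * 1024) else (l, r)

def getAnsBin (d le : Int) : Nat → Int → Int → Int
  | 0, l, _ => l
  | fuel+1, l, r =>
    if l < r then
      let mid := PySem.Int.floordiv (l + r) 2
      if getLenBef mid d ≥ le then getAnsBin d le fuel l mid
      else getAnsBin d le fuel (mid + 1) r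
    else l

def getAns (d le : Int) : Int :=
  let lr := getAnsGallop d le (le.toNat + 1) 1 1024
  getAnsBin d le ((lr.2 - lr.1).toNat + 1) lr.1 lr.2

def solveLoopA (d target : Int) : Nat → Int → String → String
  | 0, _, ans => ans
  | fuel+1, s, ans =>
    if PySem.Str.len ans < target then solveLoopA d target fuel (s + 1) (ans ++ getA s d ++ " ")
    else ans

def solve (d : Int) (pre : Int) (le : Int) : String :=
  let s := getAns d pre
  let pos := pre - getLenBef (s - 1) d - 1
  let ans := solveLoopA d (le + pos) ((le + pos).toNat + 1) s ""
  PySem.Str.slice ans (some pos) (some (le + pos))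

-- ===== PORT B =====
def getB (n d : Int) : String :=
  PySem.Int.toStr d ++ "*" ++ PySem.Int.toStr n ++ "=" ++ PySem.Int.toStr (n * d)

-- 'while True: … if jump <= 0: break' — fuel only bounds the iteration count (ample; the loop exits by its own break).
-- Python's 10 ** a (a = len(str(..)) ≥ 1) is ported as (10:Int) ^ a.toNat — exact, a is never negative.
def skipLoopB (d pre : Int) : Nat → Int → Int → Int × Int
  | 0, n, skipped => (n, skipped)
  | fuel+1, n, skipped =>
    let a := PySem.Str.len (PySem.Int.toStr n)
    let b := PySem.Str.len (PySem.Int.toStr (n * d))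
    let bl := PySem.Str.len (PySem.Int.toStr d) + a + b + 3
    let run := min ((10:Int) ^ a.toNat - 1) (PySem.Int.floordiv ((10:Int) ^ b.toNat - 1) d)
    let jump := min (run - n + 1) (PySem.Int.floordiv (pre - skipped) bl)
    if jump ≤ 0 then (n, skipped)
    else skipLoopB d pre fuel (n + jump) (skipped + jump * bl)

def solveLoopB (d skipped tot : Int) : Nat → Int → String → String
  | 0, _, s => s
  | fuel+1, n, s =>
    if skipped + PySem.Str.len s < tot then solveLoopB d skipped tot fuel (n + 1) (s ++ getB n d ++ " ")
    else s

def solve_alt (d : Int) (pre : Int) (le : Int) : String :=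
  let ns := skipLoopB d pre (pre.toNat + 1) 1 0
  let s := solveLoopB d ns.2 (pre + le) ((pre + le - ns.2).toNat + 1) ns.1 ""
  PySem.Str.slice s (some (pre - ns.2)) (some (pre + le - ns.2))

-- ===== PRECONDITION & SPEC =====
-- Pre_ excludes d ≤ 0, outside the natural domain of a multiplication table: at d = 0 A raises
-- ZeroDivisionError, and for d < 0 A's length helper ignores the minus signs of the products,
-- so its returned window sits at an accidental offset.
def Pre_solve (d : Int) (pre : Int) (le : Int) : Prop := 1 ≤ d
instance (d : Int) (pre : Int) (le : Int) : Decidable (Pre_solve d pre le) := by unfold Pre_solve; infer_instance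
def pvWitness_solve : Int × Int × Int := (2, 5, 7)

def Spec_solve (d : Int) (pre : Int) (le : Int) (out : String) : Prop := out = solve_alt d pre le
instance (d : Int) (pre : Int) (le : Int) (out : String) : Decidable (Spec_solve d pre le out) := by unfold Spec_solve; infer_instance

-- ===== CLAIM (what is proved, stated in full; the proofs are below) =====
def Claim_equal_solve : Prop := ∀ (d : Int) (pre : Int) (le : Int), Dom_solve d pre le → Pre_solve d pre le → Spec_solve d pre le (solve d pre le)

-- ===== LEMMAS AND PROOFS =====

/-! ### Decimal digit counts -/

/-- number of decimal digits of `m` (0 for `m = 0`). -/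
def dl (m : Nat) : Nat := (Nat.digits 10 m).length

lemma toDigitsCore_len : ∀ (f n : Nat) (l : List Char), 0 < f → n < 10 ^ f →
    (Nat.toDigitsCore 10 f n l).length = max (dl n) 1 + l.length := by
  intro f
  induction f with
  | zero => omega
  | succ f ih =>
    intro n l _ hn
    rw [show Nat.toDigitsCore 10 (f+1) n l =
        (if n / 10 = 0 then Nat.digitChar (n % 10) :: l
         else Nat.toDigitsCore 10 f (n / 10) (Nat.digitChar (n % 10) :: l)) by
      simp [Nat.toDigitsCore]]
    by_cases h : n / 10 = 0
    · have hn10 : n < 10 := by omega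
      have : dl n ≤ 1 := by
        simpa [dl] using (Nat.digits_length_le_iff (by norm_num) n).2 (by simpa using hn10)
      simp [h]
      omega
    · have hfpos : 0 < f := by
        by_contra hf
        have : f = 0 := by omega
        subst this
        simp at hn
        omega
      have hdiv : n / 10 < 10 ^ f := by
        have : n < 10 ^ f * 10 := by
          calc n < 10 ^ (f + 1) := hn
          _ = 10 ^ f * 10 := by ring
        exact (Nat.div_lt_iff_lt_mul (by norm_num)).2 this
      rw [if_neg h, ih (n / 10) _ hfpos hdiv]
      have hpos : 0 < n / 10 := by omega
      have hdl : 1 ≤ dl (n / 10) := by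
        have := (Nat.lt_digits_length_iff (b := 10) (by norm_num) (n / 10)).2
          (by rw [pow_zero]; omega)
        simpa [dl] using this
      have hdn : dl n = dl (n / 10) + 1 := by
        have hn0 : 0 < n := by omega
        simp [dl, Nat.digits_def' (by norm_num : (1:Nat) < 10) hn0]
      simp [hdn]
      omega

lemma toChars_len_of_nonneg (m : Int) (h : 0 ≤ m) :
    (PySem.Int.toChars m).length = max (dl m.toNat) 1 := by
  rw [PySem.Int.toChars, if_neg (by omega)]
  have : m.toNat < 10 ^ (m.toNat + 1) := by
    calc m.toNat < 10 ^ m.toNat := Nat.lt_pow_self (by norm_num)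
    _ ≤ 10 ^ (m.toNat + 1) := Nat.pow_le_pow_right (by norm_num) (by omega)
  simpa using toDigitsCore_len (m.toNat + 1) m.toNat [] (by omega) this

lemma dl_pos (m : Nat) (h : 0 < m) : 1 ≤ dl m := by
  have := (Nat.lt_digits_length_iff (b := 10) (by norm_num) m).2 (by rw [pow_zero]; omega)
  simpa [dl] using this

lemma toChars_len_of_pos (m : Int) (h : 0 < m) :
    (PySem.Int.toChars m).length = dl m.toNat := by
  rw [toChars_len_of_nonneg m (by omega)]
  have := dl_pos m.toNat (by omega)
  omega

lemma dl_eq_of (k m : Nat) (h1 : 10 ^ k ≤ m) (h2 : m < 10 ^ (k + 1)) : dl m = k + 1 := by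
  have hle : dl m ≤ k + 1 := by
    simpa [dl] using (Nat.digits_length_le_iff (by norm_num) m).2 h2
  have hlt : k < dl m := by
    simpa [dl] using (Nat.lt_digits_length_iff (b := 10) (by norm_num) m).2 h1
  omega

/-! ### getMulLen computes a sum of digit counts -/

/-- `∑ i ∈ [a, b), dl (i*D)`. -/
def Sdl (D a b : Nat) : Nat := ∑ i ∈ Finset.Ico a b, dl (i * D)

lemma Sdl_glue (D a b c : Nat) (h1 : a ≤ b) (h2 : b ≤ c) :
    Sdl D a b + Sdl D b c = Sdl D a c := by
  unfold Sdl
  exact Finset.sum_Ico_consecutive _ h1 h2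

lemma Sdl_const (D k a b : Nat) (hD : 1 ≤ D) (hab : a ≤ b)
    (hlo : ∀ i, a ≤ i → 10 ^ k ≤ i * D) (hhi : ∀ i, i < b → i * D < 10 ^ (k + 1)) :
    Sdl D a b = (b - a) * (k + 1) := by
  unfold Sdl
  rw [Finset.sum_congr rfl (fun i hi => ?_), Finset.sum_const, Nat.card_Ico, smul_eq_mul]
  rw [Finset.mem_Ico] at hi
  exact dl_eq_of k (i * D) (hlo i hi.1) (hhi i hi.2)

lemma div_min (a b D : Nat) (hD : 1 ≤ D) : min a b / D = min (a / D) (b / D) := by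
  rcases le_total a b with h | h
  · rw [min_eq_left h, min_eq_left (Nat.div_le_div_right h)]
  · rw [min_eq_right h, min_eq_right (Nat.div_le_div_right h)]

lemma mulLenLoop_inv (N D : Nat) (hD : 1 ≤ D) :
    ∀ (fuel k : Nat) (res : Int), 10 ^ k ≤ N * D → N * D ≤ fuel + k →
      getMulLenLoop (↑(N * D)) (↑D) fuel (↑(10 ^ k : Nat)) (↑(k + 1 : Nat)) res
        = res + ↑(Sdl D ((10 ^ k - 1) / D + 1) (N + 1)) := by
  intro fuel
  induction fuel with
  | zero =>
    intro k res hbase hfuel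
    exfalso
    have : k < 10 ^ k := Nat.lt_pow_self (by norm_num)
    omega
  | succ fuel ih =>
    intro k res hbase hfuel
    have hpow1 : (1:Nat) ≤ 10 ^ k := Nat.one_le_pow _ _ (by norm_num)
    have hpowS : (10:Nat) ^ (k + 1) = 10 ^ k * 10 := by ring
    have hpow1S : (1:Nat) ≤ 10 ^ (k + 1) := Nat.one_le_pow _ _ (by norm_num)
    set A1 := (10 ^ k - 1) / D with hA1
    set A2 := (10 ^ (k + 1) - 1) / D with hA2
    have hNpos : 1 ≤ N := by
      rcases Nat.eq_zero_or_pos N with h | h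
      · subst h; simp at hbase
      · omega
    have hND1 : (N * D - 1) / D = N - 1 := by
      have h1 : (N * D - 1) / D < N := by
        rw [Nat.div_lt_iff_lt_mul (by omega)]
        have : 1 ≤ N * D := by nlinarith
        omega
      have h2 : N - 1 ≤ (N * D - 1) / D := by
        rw [Nat.le_div_iff_mul_le (by omega)]
        have h3 : (N - 1) * D + D = N * D := by
          have h4 : N - 1 + 1 = N := by omega
          calc (N - 1) * D + D = (N - 1 + 1) * D := by ring
          _ = N * D := by rw [h4]
        omega
      omega
    have hA1N : A1 ≤ N - 1 := by
      rw [hA1, ← hND1]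
      exact Nat.div_le_div_right (by omega)
    have hA1A2 : A1 ≤ A2 := by
      rw [hA1, hA2]
      apply Nat.div_le_div_right
      have : (10:Nat) ^ k ≤ 10 ^ (k + 1) := Nat.pow_le_pow_right (by norm_num) (by omega)
      omega
    have hM : min (10 ^ (k + 1) - 1) (N * D) / D = min A2 N := by
      have hc : N * D / D = N := Nat.mul_div_cancel N (by omega : 0 < D)
      rw [div_min _ _ D hD, hc, ← hA2]
    have hA1M : A1 ≤ min A2 N := by
      simp only [le_min_iff]
      omega
    have hlo' : ∀ i, A1 + 1 ≤ i → 10 ^ k ≤ i * D := by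
      intro i hi
      have h1 : (10 ^ k - 1) / D < i := by omega
      have := (Nat.div_lt_iff_lt_mul (by omega : 0 < D)).1 h1
      omega
    have hhi' : ∀ i, i < min A2 N + 1 → i * D < 10 ^ (k + 1) := by
      intro i hi
      have h1 : i ≤ (10 ^ (k + 1) - 1) / D := by
        have : i ≤ A2 := by omega
        omega
      have := (Nat.le_div_iff_mul_le (by omega : 0 < D)).1 h1
      omega
    have hsum : Sdl D (A1 + 1) (min A2 N + 1) = (min A2 N + 1 - (A1 + 1)) * (k + 1) :=
      Sdl_const D k (A1 + 1) (min A2 N + 1) hD (by omega) hlo' hhi'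
    -- unfold one loop iteration
    rw [getMulLenLoop]
    have hlow : PySem.Int.floordiv (((10 ^ k : Nat) : Int) - 1) (↑D) = (A1 : Int) := by
      rw [show (((10 ^ k : Nat) : Int) - 1) = ((10 ^ k - 1 : Nat) : Int) by
        rw [Nat.cast_sub hpow1]; ring, PySem.Int.floordiv_natCast, ← hA1]
    have hupp : PySem.Int.floordiv
        (min (((10 ^ k : Nat) : Int) * 10 - 1) ((N * D : Nat) : Int)) (↑D)
        = ((min A2 N : Nat) : Int) := by
      rw [show min (((10 ^ k : Nat) : Int) * 10 - 1) ((N * D : Nat) : Int)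
          = ((min (10 ^ (k + 1) - 1) (N * D) : Nat) : Int) by
        rw [Nat.cast_min]
        congr 1
        rw [Nat.cast_sub hpow1S, hpowS]
        push_cast
        ring]
      rw [PySem.Int.floordiv_natCast, hM]
    simp only [hlow, hupp]
    by_cases hstop : (((10 ^ k : Nat) : Int) * 10 > ((N * D : Nat) : Int))
    · rw [if_pos hstop]
      have hgt : N * D < 10 ^ (k + 1) := by
        rw [hpowS]
        exact_mod_cast hstop
      have hNA2 : N ≤ A2 := by
        rw [hA2, Nat.le_div_iff_mul_le (by omega)]
        omega
      rw [min_eq_right hNA2] at hsum ⊢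
      rw [show N + 1 - (A1 + 1) = N - A1 by omega] at hsum
      rw [show ((N : Nat) : Int) - (A1 : Int) = ((N - A1 : Nat) : Int) by
        rw [Nat.cast_sub (by omega)], hsum]
      push_cast
      ring
    · rw [if_neg hstop]
      have hle : 10 ^ (k + 1) ≤ N * D := by
        rw [hpowS]
        have h := not_lt.1 hstop
        exact_mod_cast h
      have hA2N : A2 ≤ N := by
        calc A2 ≤ (N * D - 1) / D := by
              rw [hA2]; exact Nat.div_le_div_right (by omega)
        _ = N - 1 := hND1
        _ ≤ N := by omega
      rw [min_eq_left hA2N] at hsum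
      rw [show A2 + 1 - (A1 + 1) = A2 - A1 by omega] at hsum
      have hcast1 : (((10 ^ k : Nat) : Int) * 10) = ((10 ^ (k + 1) : Nat) : Int) := by
        rw [hpowS]; push_cast; ring
      have hcast2 : ((k + 1 : Nat) : Int) + 1 = ((k + 1 + 1 : Nat) : Int) := by push_cast; ring
      rw [min_eq_left hA2N, hcast1, hcast2, ih (k + 1) _ hle (by omega), ← hA2]
      rw [show ((A2 : Nat) : Int) - (A1 : Int) = ((A2 - A1 : Nat) : Int) by
        rw [Nat.cast_sub (by omega)]]
      rw [show ((A2 - A1 : Nat) : Int) * ((k + 1 : Nat) : Int)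
          = (((A2 - A1) * (k + 1) : Nat) : Int) by push_cast; ring, ← hsum]
      have hglue : Sdl D (A1 + 1) (A2 + 1) + Sdl D (A2 + 1) (N + 1) = Sdl D (A1 + 1) (N + 1) :=
        Sdl_glue D _ _ _ (by omega) (by omega)
      rw [← hglue]
      push_cast
      ring

lemma getMulLen_eq (n d : Int) (hd : 1 ≤ d) (hn : 0 ≤ n) :
    getMulLen n d = ↑(Sdl d.toNat 1 (n.toNat + 1)) := by
  rcases Nat.eq_zero_or_pos n.toNat with hN | hN
  · have hn0 : n = 0 := by omega
    subst hn0
    rw [hN]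
    norm_num [getMulLen, getMulLenLoop, Sdl]
  · set N := n.toNat with hNdef
    set D := d.toNat with hDdef
    have hcn : ((N : Nat) : Int) = n := by omega
    have hcd : ((D : Nat) : Int) = d := by omega
    have h1 : n * d = ((N * D : Nat) : Int) := by rw [Nat.cast_mul, hcn, hcd]
    rw [getMulLen, h1, Int.toNat_natCast, ← hcd]
    have hprod : 1 ≤ N * D := by
      have := Nat.mul_pos (by omega : 0 < N) (by omega : 0 < D)
      omega
    have h2 := mulLenLoop_inv N D (by omega) (N * D + 1) 0 0
      (by rw [pow_zero]; omega) (by omega)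
    simp only [pow_zero, Nat.sub_self, Nat.zero_div, zero_add, Nat.cast_one] at h2
    exact h2

/-! ### blocks and their concatenation -/

def blkL (d i : Int) : List Char :=
  PySem.Int.toChars d ++ '*' :: PySem.Int.toChars i ++ '=' :: PySem.Int.toChars (i * d) ++ [' ']

def catL (d : Int) : Nat → List Char
  | 0 => []
  | k+1 => catL d k ++ blkL d (k + 1)

lemma blkL_length (d i : Int) (hd : 1 ≤ d) (hi : 1 ≤ i) :
    (blkL d i).length = dl d.toNat + dl i.toNat + dl (i.toNat * d.toNat) + 3 := by
  have h1 : (PySem.Int.toChars d).length = dl d.toNat := toChars_len_of_pos d (by omega)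
  have h2 : (PySem.Int.toChars i).length = dl i.toNat := toChars_len_of_pos i (by omega)
  have h3 : (PySem.Int.toChars (i * d)).length = dl (i.toNat * d.toNat) := by
    rw [toChars_len_of_pos (i * d) (by positivity), Int.toNat_mul (by omega) (by omega)]
  simp only [blkL, List.length_append, List.length_cons, List.length_nil, h1, h2, h3]
  omega

lemma blkL_length_pos (d i : Int) : 1 ≤ (blkL d i).length := by
  simp only [blkL, List.length_append, List.length_cons, List.length_nil]
  omega

lemma catL_succ (d : Int) (n : Nat) : catL d (n + 1) = catL d n ++ blkL d ((n : Int) + 1) := by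
  simp [catL]

lemma catL_length (d : Int) (hd : 1 ≤ d) (n : Nat) :
    (catL d n).length
      = n * (dl d.toNat + 3) + (∑ i ∈ Finset.Ico 1 (n + 1), dl i) + Sdl d.toNat 1 (n + 1) := by
  induction n with
  | zero => simp [catL, Sdl]
  | succ n ih =>
    have hb : (blkL d ((n : Int) + 1)).length
        = dl d.toNat + dl (n + 1) + dl ((n + 1) * d.toNat) + 3 := by
      have := blkL_length d ((n : Int) + 1) hd (by omega)
      simpa using this
    have e1 : ∑ i ∈ Finset.Ico 1 (n + 1 + 1), dl i
        = (∑ i ∈ Finset.Ico 1 (n + 1), dl i) + dl (n + 1) :=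
      Finset.sum_Ico_succ_top (by omega) _
    have e2 : Sdl d.toNat 1 (n + 1 + 1) = Sdl d.toNat 1 (n + 1) + dl ((n + 1) * d.toNat) :=
      Finset.sum_Ico_succ_top (by omega) _
    rw [catL_succ, List.length_append, ih, hb, e1, e2]
    have hm : (n + 1) * (dl d.toNat + 3) = n * (dl d.toNat + 3) + (dl d.toNat + 3) := by ring
    rw [hm]
    omega

lemma catL_len_mono (d : Int) {a b : Nat} (h : a ≤ b) :
    (catL d a).length ≤ (catL d b).length := by
  induction b with
  | zero =>
    have : a = 0 := by omega
    subst this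
    exact le_refl _
  | succ b ih =>
    by_cases hab : a = b + 1
    · subst hab; exact le_refl _
    · have : a ≤ b := by omega
      calc (catL d a).length ≤ (catL d b).length := ih this
      _ ≤ (catL d (b + 1)).length := by
          rw [catL_succ, List.length_append]
          omega

lemma catL_len_lower (d : Int) (n : Nat) : n ≤ (catL d n).length := by
  induction n with
  | zero => simp [catL]
  | succ n ih =>
    rw [catL_succ, List.length_append]
    have := blkL_length_pos d ((n : Int) + 1)
    omega

lemma lenBef_eq (d : Int) (hd : 1 ≤ d) (n : Int) (hn : 0 ≤ n) :
    getLenBef n d = ((catL d n.toNat).length : Int) - 1 := by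
  have hS : PySem.Str.len (PySem.Int.toStr d) = ((dl d.toNat : Nat) : Int) := by
    rw [PySem.Str.len_eq, PySem.Int.toList_toStr, toChars_len_of_pos d (by omega)]
  have h1 : getMulLen n 1 = ((∑ i ∈ Finset.Ico 1 (n.toNat + 1), dl i : Nat) : Int) := by
    rw [getMulLen_eq n 1 (by norm_num) hn]
    congr 1
    unfold Sdl
    exact Finset.sum_congr rfl (fun i _ => by norm_num)
  have h2 : getMulLen n d = ↑(Sdl d.toNat 1 (n.toNat + 1)) := getMulLen_eq n d hd hn
  simp only [getLenBef]
  rw [hS, h1, h2, catL_length d hd n.toNat]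
  set N := n.toNat with hNdef
  rw [show n = ((N : Nat) : Int) by omega]
  push_cast
  ring

lemma lenBef_mono (d : Int) (hd : 1 ≤ d) {a b : Int} (ha : 0 ≤ a) (h : a ≤ b) :
    getLenBef a d ≤ getLenBef b d := by
  rw [lenBef_eq d hd a ha, lenBef_eq d hd b (by omega)]
  have := catL_len_mono d (a := a.toNat) (b := b.toNat) (by omega)
  omega

lemma lenBef_lower (d : Int) (hd : 1 ≤ d) (n : Int) (hn : 0 ≤ n) :
    n - 1 ≤ getLenBef n d := by
  rw [lenBef_eq d hd n hn]
  have := catL_len_lower d n.toNat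
  omega

/-! ### getAns returns the least block whose prefix length reaches `pre` -/

def AnsSpec (d pre s : Int) : Prop :=
  1 ≤ s ∧ pre ≤ getLenBef s d ∧ ∀ k : Int, 1 ≤ k → k < s → getLenBef k d < pre

lemma gallop_spec (d pre : Int) (hd : 1 ≤ d) :
    ∀ (fuel : Nat) (l r : Int), 1 ≤ l → r = 1024 * l →
      (∀ k : Int, 1 ≤ k → k < l → getLenBef k d < pre) → pre < fuel + r →
      (1 ≤ (getAnsGallop d pre fuel l r).1 ∧
       (getAnsGallop d pre fuel l r).1 ≤ (getAnsGallop d pre fuel l r).2 ∧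
       pre ≤ getLenBef (getAnsGallop d pre fuel l r).2 d ∧
       ∀ k : Int, 1 ≤ k → k < (getAnsGallop d pre fuel l r).1 → getLenBef k d < pre) := by
  intro fuel
  induction fuel with
  | zero =>
    intro l r hl hr hk hfuel
    have hlow := lenBef_lower d hd r (by omega)
    rw [getAnsGallop]
    dsimp only
    exact ⟨hl, by omega, by omega, hk⟩
  | succ fuel ih =>
    intro l r hl hr hk hfuel
    rw [getAnsGallop]
    by_cases hc : getLenBef r d < pre
    · rw [if_pos hc]
      apply ih (l * 1024) (r * 1024) (by omega) (by omega)
      · intro k hk1 hk2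
        have : k ≤ r := by omega
        calc getLenBef k d ≤ getLenBef r d := lenBef_mono d hd (by omega) this
        _ < pre := hc
      · omega
    · rw [if_neg hc]
      dsimp only
      exact ⟨hl, by omega, by omega, hk⟩

lemma bin_spec (d pre : Int) (hd : 1 ≤ d) :
    ∀ (fuel : Nat) (l r : Int), 1 ≤ l → l ≤ r → (r - l).toNat < fuel →
      pre ≤ getLenBef r d → (∀ k : Int, 1 ≤ k → k < l → getLenBef k d < pre) →
      AnsSpec d pre (getAnsBin d pre fuel l r) := by
  intro fuel
  induction fuel with
  | zero => intro l r _ _ hf _ _; exfalso; omega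
  | succ fuel ih =>
    intro l r hl hlr hf hr hk
    rw [getAnsBin]
    by_cases hc : l < r
    · rw [if_pos hc]
      have hmb := PySem.Int.floordiv_two_mid_bounds (le_of_lt hc)
      have hmlt : PySem.Int.floordiv (l + r) 2 < r :=
        (PySem.Int.floordiv_lt_iff_lt_mul (by norm_num)).2 (by omega)
      by_cases hm : getLenBef (PySem.Int.floordiv (l + r) 2) d ≥ pre
      · rw [if_pos hm]
        exact ih l _ hl hmb.1 (by omega) hm hk
      · rw [if_neg hm]
        apply ih _ r (by omega) (by omega) (by omega) hr
        intro k hk1 hk2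
        by_cases hkl : k < l
        · exact hk k hk1 hkl
        · have : k ≤ PySem.Int.floordiv (l + r) 2 := by omega
          calc getLenBef k d ≤ getLenBef (PySem.Int.floordiv (l + r) 2) d :=
            lenBef_mono d hd (by omega) this
          _ < pre := by omega
    · rw [if_neg hc]
      have : l = r := by omega
      subst this
      exact ⟨hl, hr, hk⟩

lemma getAns_spec (d pre : Int) (hd : 1 ≤ d) : AnsSpec d pre (getAns d pre) := by
  rw [getAns]
  have hg := gallop_spec d pre hd (pre.toNat + 1) 1 1024 (by norm_num) (by norm_num)
    (by intro k h1 h2; omega)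
    (by have := Int.self_le_toNat pre; push_cast; omega)
  exact bin_spec d pre hd _ _ _ hg.1 hg.2.1 (by omega) hg.2.2.1 hg.2.2.2

/-! ### the build loops -/

def listLoop (d T : Int) : Nat → Int → List Char → List Char
  | 0, _, s => s
  | f+1, n, s => if (s.length : Int) < T then listLoop d T f (n + 1) (s ++ blkL d n) else s

lemma get_append_toList (n d : Int) : (getA n d ++ " ").toList = blkL d n := by
  simp [getA, blkL, String.toList_append, PySem.Int.toList_toStr]

lemma solveLoopA_toList (d T : Int) :
    ∀ (fuel : Nat) (n : Int) (s : String),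
      (solveLoopA d T fuel n s).toList = listLoop d T fuel n s.toList := by
  intro fuel
  induction fuel with
  | zero => intro n s; simp [solveLoopA, listLoop]
  | succ f ih =>
    intro n s
    rw [solveLoopA, listLoop, PySem.Str.len_eq]
    by_cases h : (s.toList.length : Int) < T
    · rw [if_pos h, if_pos h, ih]
      congr 1
      rw [String.append_assoc, String.toList_append, get_append_toList]
    · rw [if_neg h, if_neg h]

lemma solveLoopB_toList (d skipped tot : Int) :
    ∀ (fuel : Nat) (n : Int) (s : String),
      (solveLoopB d skipped tot fuel n s).toList = listLoop d (tot - skipped) fuel n s.toList := by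
  intro fuel
  induction fuel with
  | zero => intro n s; simp [solveLoopB, listLoop]
  | succ f ih =>
    intro n s
    rw [solveLoopB, listLoop, PySem.Str.len_eq]
    by_cases h : (s.toList.length : Int) < tot - skipped
    · rw [if_pos (by omega : skipped + (s.toList.length : Int) < tot), if_pos h, ih]
      congr 1
      rw [String.append_assoc, String.toList_append]
      rw [show getB n d ++ " " = getA n d ++ " " from rfl, get_append_toList]
    · rw [if_neg (by omega : ¬ skipped + (s.toList.length : Int) < tot), if_neg h]

lemma listLoop_of_ge (d T : Int) (f : Nat) (n : Int) (s : List Char)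
    (h : T ≤ (s.length : Int)) : listLoop d T f n s = s := by
  cases f with
  | zero => rfl
  | succ f => rw [listLoop, if_neg (by omega)]

lemma listLoop_fuel_irrel (d T : Int) :
    ∀ (f1 f2 : Nat) (n : Int) (s : List Char),
      (T - s.length).toNat ≤ f1 → (T - s.length).toNat ≤ f2 →
      listLoop d T f1 n s = listLoop d T f2 n s := by
  intro f1
  induction f1 with
  | zero =>
    intro f2 n s h1 _
    have hT : T ≤ (s.length : Int) := by omega
    rw [listLoop_of_ge d T 0 n s hT, listLoop_of_ge d T f2 n s hT]
  | succ f1 ih =>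
    intro f2 n s h1 h2
    by_cases hT : T ≤ (s.length : Int)
    · rw [listLoop_of_ge d T _ n s hT, listLoop_of_ge d T f2 n s hT]
    · obtain ⟨f2', rfl⟩ : ∃ f2', f2 = f2' + 1 := by
        cases f2 with
        | zero => exfalso; omega
        | succ f2' => exact ⟨f2', rfl⟩
      rw [listLoop, if_pos (by omega), listLoop, if_pos (by omega)]
      have hb := blkL_length_pos d n
      apply ih
      · simp only [List.length_append]; omega
      · simp only [List.length_append]; omega

lemma listLoop_shift (d T : Int) (u : List Char) :
    ∀ (f : Nat) (n : Int) (s : List Char),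
      listLoop d (T + u.length) f n (u ++ s) = u ++ listLoop d T f n s := by
  intro f
  induction f with
  | zero => intro n s; simp [listLoop]
  | succ f ih =>
    intro n s
    rw [listLoop, listLoop]
    by_cases h : (s.length : Int) < T
    · rw [if_pos (by simp only [List.length_append]; push_cast; omega), if_pos h,
        List.append_assoc, ih]
    · rw [if_neg (by simp only [List.length_append]; push_cast; omega), if_neg h]

lemma listLoop_walk (d T : Int) :
    ∀ (j : Nat) (f : Nat), T.toNat ≤ f →
      (∀ m : Nat, m < j → ((catL d m).length : Int) < T) →
      listLoop d T f 1 [] = listLoop d T f ((j : Int) + 1) (catL d j) := by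
  intro j
  induction j with
  | zero => intro f _ _; simp [catL]
  | succ j ih =>
    intro f hf h
    rw [ih f hf (fun m hm => h m (by omega))]
    have hcat : ((catL d j).length : Int) < T := h j (by omega)
    obtain ⟨f', rfl⟩ : ∃ f', f = f' + 1 := by
      cases f with
      | zero => exfalso; omega
      | succ f' => exact ⟨f', rfl⟩
    rw [listLoop, if_pos hcat, ← catL_succ]
    have hlen : 1 ≤ (catL d (j + 1)).length := by
      rw [catL_succ, List.length_append]
      have := blkL_length_pos d ((j : Int) + 1)
      omega
    have hidx : (j : Int) + 1 + 1 = ((j + 1 : Nat) : Int) + 1 := by push_cast; ring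
    rw [hidx]
    exact listLoop_fuel_irrel d T f' (f' + 1) _ _ (by omega) (by omega)

/-! ### the skip loop of B -/

lemma catL_run (d : Int) (n : Int) (hn : 1 ≤ n) (blv : Nat) :
    ∀ j : Nat, (∀ m : Int, n ≤ m → m < n + j → (blkL d m).length = blv) →
      (catL d ((n - 1).toNat + j)).length = (catL d (n - 1).toNat).length + j * blv := by
  intro j
  induction j with
  | zero => intro _; simp
  | succ j ih =>
    intro h
    rw [show (n - 1).toNat + (j + 1) = ((n - 1).toNat + j) + 1 by omega, catL_succ,
      List.length_append, ih (fun m h1 h2 => h m h1 (by push_cast at h2 ⊢; omega))]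
    have hm : (((n - 1).toNat + j : Nat) : Int) + 1 = n + j := by push_cast; omega
    rw [hm, h (n + j) (by omega) (by push_cast; omega)]
    ring

lemma dl_low (m : Nat) (hm : 1 ≤ m) : 10 ^ (dl m - 1) ≤ m := by
  have h := (Nat.lt_digits_length_iff (b := 10) (by norm_num) m).1
    (show dl m - 1 < (Nat.digits 10 m).length by
      have := dl_pos m hm
      simp only [dl] at *
      omega)
  exact h

lemma dl_high (m : Nat) : m < 10 ^ (dl m) :=
  (Nat.digits_length_le_iff (by norm_num) m).1 (le_refl _)

lemma skipLoop_spec (d pre : Int) (hd : 1 ≤ d) :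
    ∀ (fuel : Nat) (n skipped : Int),
      1 ≤ n → skipped = ((catL d (n - 1).toNat).length : Int) → (skipped ≤ pre ∨ skipped = 0) →
      (1 ≤ (skipLoopB d pre fuel n skipped).1 ∧
       (skipLoopB d pre fuel n skipped).2
         = ((catL d ((skipLoopB d pre fuel n skipped).1 - 1).toNat).length : Int) ∧
       ((skipLoopB d pre fuel n skipped).2 ≤ pre ∨ (skipLoopB d pre fuel n skipped).2 = 0)) := by
  intro fuel
  induction fuel with
  | zero =>
    intro n skipped hn hskip hdisj
    exact ⟨hn, hskip, hdisj⟩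
  | succ fuel ih =>
    intro n skipped hn hskip hdisj
    rw [skipLoopB]
    have hd0 : (0:Int) < d := by omega
    have hA : PySem.Str.len (PySem.Int.toStr n) = ((dl n.toNat : Nat) : Int) := by
      rw [PySem.Str.len_eq, PySem.Int.toList_toStr, toChars_len_of_pos n (by omega)]
    have hBv : PySem.Str.len (PySem.Int.toStr (n * d)) = ((dl (n.toNat * d.toNat) : Nat) : Int) := by
      rw [PySem.Str.len_eq, PySem.Int.toList_toStr, toChars_len_of_pos (n * d) (by positivity),
        Int.toNat_mul (by omega) (by omega)]
    have hDv : PySem.Str.len (PySem.Int.toStr d) = ((dl d.toNat : Nat) : Int) := by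
      rw [PySem.Str.len_eq, PySem.Int.toList_toStr, toChars_len_of_pos d (by omega)]
    rw [hA, hBv, hDv]
    simp only [Int.toNat_natCast]
    set A := dl n.toNat with hAdef
    set Bv := dl (n.toNat * d.toNat) with hBdef
    set Dv := dl d.toNat with hDdef
    set run := min ((10:Int) ^ A - 1) (PySem.Int.floordiv ((10:Int) ^ Bv - 1) d) with hrun
    set bl := ((Dv : Nat) : Int) + ((A : Nat) : Int) + ((Bv : Nat) : Int) + 3 with hbl
    set jump := min (run - n + 1) (PySem.Int.floordiv (pre - skipped) bl) with hjump
    by_cases hj : jump ≤ 0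
    · rw [if_pos hj]
      exact ⟨hn, hskip, hdisj⟩
    · rw [if_neg hj]
      have hj1 : 1 ≤ jump := by omega
      have hblpos : (0:Int) < bl := by rw [hbl]; positivity
      have hjle1 : jump ≤ run - n + 1 := by rw [hjump]; exact min_le_left _ _
      have hjle2 : jump * bl ≤ pre - skipped := by
        have h := min_le_right (run - n + 1) (PySem.Int.floordiv (pre - skipped) bl)
        rw [← hjump] at h
        exact (PySem.Int.le_floordiv_iff_mul_le hblpos).1 h
      have hnN : 1 ≤ n.toNat := by omega
      have hndN : 1 ≤ n.toNat * d.toNat := by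
        have := Nat.mul_pos (by omega : 0 < n.toNat) (by omega : 0 < d.toNat)
        omega
      have hApos : 1 ≤ A := dl_pos _ hnN
      have hBpos : 1 ≤ Bv := dl_pos _ hndN
      have hAlow : 10 ^ (A - 1) ≤ n.toNat := dl_low _ hnN
      have hAhigh : n.toNat < 10 ^ A := dl_high _
      have hBlow : 10 ^ (Bv - 1) ≤ n.toNat * d.toNat := dl_low _ hndN
      have hBhigh : n.toNat * d.toNat < 10 ^ Bv := dl_high _
      have hcastA : ((10 ^ A : Nat) : Int) = (10:Int) ^ A := by push_cast; ring
      have hcastB : ((10 ^ Bv : Nat) : Int) = (10:Int) ^ Bv := by push_cast; ring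
      have hcastnd : ((n.toNat * d.toNat : Nat) : Int) = n * d := by
        push_cast
        rw [Int.toNat_of_nonneg (by omega), Int.toNat_of_nonneg (by omega)]
      have hrund : run * d ≤ (10:Int) ^ Bv - 1 := by
        have h2 : run ≤ PySem.Int.floordiv ((10:Int) ^ Bv - 1) d := by
          rw [hrun]; exact min_le_right _ _
        exact (PySem.Int.le_floordiv_iff_mul_le hd0).1 h2
      have hrunA : run ≤ (10:Int) ^ A - 1 := by rw [hrun]; exact min_le_left _ _
      have hblk : ∀ m : Int, n ≤ m → m < n + jump → (blkL d m).length = Dv + A + Bv + 3 := by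
        intro m h1 h2
        have hm1 : 1 ≤ m := by omega
        have hmrun : m ≤ run := by omega
        have hdlm : dl m.toNat = A := by
          have hhigh : m.toNat < 10 ^ A := by omega
          have hlow : 10 ^ (A - 1) ≤ m.toNat := by
            have : n.toNat ≤ m.toNat := by omega
            omega
          have := dl_eq_of (A - 1) m.toNat hlow (by rw [show A - 1 + 1 = A by omega]; exact hhigh)
          omega
        have hdlmd : dl (m.toNat * d.toNat) = Bv := by
          have hmd : m * d ≤ (10:Int) ^ Bv - 1 := by
            calc m * d ≤ run * d := by
                  apply mul_le_mul_of_nonneg_right hmrun (by omega)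
            _ ≤ (10:Int) ^ Bv - 1 := hrund
          have hmdlow : n * d ≤ m * d := mul_le_mul_of_nonneg_right h1 (by omega)
          have hcastmd : ((m.toNat * d.toNat : Nat) : Int) = m * d := by
            push_cast
            rw [Int.toNat_of_nonneg (by omega), Int.toNat_of_nonneg (by omega)]
          have hhigh : m.toNat * d.toNat < 10 ^ Bv := by omega
          have hlow : 10 ^ (Bv - 1) ≤ m.toNat * d.toNat := by omega
          have := dl_eq_of (Bv - 1) _ hlow (by rw [show Bv - 1 + 1 = Bv by omega]; exact hhigh)
          omega
        rw [blkL_length d m hd hm1, hdlm, hdlmd]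
      have hj' : ((jump.toNat : Nat) : Int) = jump := by omega
      have hcatj := catL_run d n hn (Dv + A + Bv + 3) jump.toNat
        (by intro m h1 h2; exact hblk m h1 (by omega))
      have hskip' : skipped + jump * bl
          = (((catL d ((n + jump - 1).toNat)).length : Nat) : Int) := by
        rw [show (n + jump - 1).toNat = (n - 1).toNat + jump.toNat by omega, hcatj, hskip, hbl]
        push_cast [hj']
        ring
      exact ih (n + jump) (skipped + jump * bl) (by omega) hskip' (Or.inl (by omega))

/-! ### final assembly -/

lemma clampIdx_zero (b : Int) : PySem.List.clampIdx 0 b = 0 := by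
  rw [PySem.List.clampIdx]
  split_ifs <;> omega

lemma slice_nil {α : Type} (a b : Int) : PySem.List.slice ([] : List α) (some a) (some b) = [] := by
  have h := PySem.List.length_slice ([] : List α) a b
  simp only [List.length_nil, clampIdx_zero] at h
  exact List.eq_nil_of_length_eq_zero (by omega)

lemma window_eq (d pre le : Int) (hd : 1 ≤ d) (hpre : 0 ≤ pre) (hle : 1 ≤ le)
    (t : Int) (ht : 1 ≤ t) (hC : ((catL d (t - 1).toNat).length : Int) ≤ pre) :
    PySem.List.slice
        (listLoop d (pre + le - ((catL d (t - 1).toNat).length : Int))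
          ((pre + le - ((catL d (t - 1).toNat).length : Int)).toNat + 1) t [])
        (some (pre - ((catL d (t - 1).toNat).length : Int)))
        (some (pre + le - ((catL d (t - 1).toNat).length : Int)))
      = PySem.List.slice (listLoop d (pre + le) ((pre + le).toNat + 1) 1 [])
          (some pre) (some (pre + le)) := by
  set u := catL d (t - 1).toNat with hu
  rw [listLoop_walk d (pre + le) (t - 1).toNat ((pre + le).toNat + 1) (by omega)
    (by
      intro m hm
      have h1 : (catL d m).length ≤ u.length := by
        rw [hu]
        exact catL_len_mono d (by omega)
      omega)]
  rw [← hu, show (((t - 1).toNat : Nat) : Int) + 1 = t by omega]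
  have hshift := listLoop_shift d (pre + le - (u.length : Int)) u ((pre + le).toNat + 1) t []
  rw [List.append_nil] at hshift
  rw [show pre + le - (u.length : Int) + ((u.length : Nat) : Int) = pre + le by ring] at hshift
  rw [hshift]
  have hfi := listLoop_fuel_irrel d (pre + le - (u.length : Int))
    ((pre + le).toNat + 1) ((pre + le - (u.length : Int)).toNat + 1) t ([] : List Char)
    (by simp only [List.length_nil, Nat.cast_zero]; omega)
    (by simp only [List.length_nil, Nat.cast_zero]; omega)
  rw [hfi]
  rw [PySem.List.slice_toNat _ (by omega : (0:Int) ≤ pre - (u.length : Int))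
      (by omega : (0:Int) ≤ pre + le - (u.length : Int)),
    PySem.List.slice_toNat _ (by omega : (0:Int) ≤ pre) (by omega : (0:Int) ≤ pre + le),
    show pre.toNat = u.length + (pre - (u.length : Int)).toNat by omega,
    List.drop_append,
    List.drop_eq_nil_of_le (by omega : u.length ≤ u.length + (pre - (u.length : Int)).toNat),
    show u.length + (pre - (u.length : Int)).toNat - u.length
      = (pre - (u.length : Int)).toNat by omega,
    show (pre + le).toNat - (u.length + (pre - (u.length : Int)).toNat)
      = (pre + le - (u.length : Int)).toNat - (pre - (u.length : Int)).toNat by omega,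
    List.nil_append]

theorem solve_eq_alt (d pre le : Int) (hd : 1 ≤ d) : solve d pre le = solve_alt d pre le := by
  obtain ⟨hs1, hs2, hs3⟩ := getAns_spec d pre hd
  obtain ⟨hb1, hb2, hb3⟩ := skipLoop_spec d pre hd (pre.toNat + 1) 1 0 (by norm_num)
    (by norm_num [catL]) (Or.inr rfl)
  apply String.toList_inj.mp
  simp only [solve, solve_alt, PySem.Str.toList_slice, PySem.Chars.slice_eq_listSlice,
    solveLoopA_toList, solveLoopB_toList, String.toList_empty]
  set s0 := getAns d pre with hs0
  set nb := (skipLoopB d pre (pre.toNat + 1) 1 0).1 with hnb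
  set sk := (skipLoopB d pre (pre.toNat + 1) 1 0).2 with hsk
  set L0 := getLenBef (s0 - 1) d with hL0
  set pos := pre - L0 - 1 with hposdef
  have hcat0 : L0 = ((catL d (s0 - 1).toNat).length : Int) - 1 := by
    rw [hL0]
    exact lenBef_eq d hd _ (by omega)
  have hsknn : 0 ≤ sk := by
    rw [hb2]
    positivity
  by_cases hpre : pre < 0
  · -- pre < 0 : both sides degenerate to the plain scan from block 1
    have hs01 : s0 = 1 := by
      by_contra h
      have h2 : (2:Int) ≤ s0 := by omega
      have h3 := hs3 1 (by norm_num) (by omega)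
      have h4 := lenBef_lower d hd 1 (by norm_num)
      omega
    have hsk0 : sk = 0 := by omega
    have hnb1 : nb = 1 := by
      have h1 := catL_len_lower d (nb - 1).toNat
      rw [hsk0] at hb2
      omega
    have hL0v : L0 = -1 := by
      rw [hcat0, hs01]
      norm_num [catL]
    rw [show pos = pre by omega, hs01, hnb1, hsk0, show le + pre = pre + le by ring]
    norm_num
  · push_neg at hpre
    have hL0lt : L0 < pre := by
      rcases eq_or_lt_of_le hs1 with h1 | h1
      · rw [hcat0, ← h1]
        norm_num [catL]
        omega
      · rw [hL0]
        exact hs3 (s0 - 1) (by omega) (by omega)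
    have hposnn : 0 ≤ pos := by omega
    have hCA : ((catL d (s0 - 1).toNat).length : Int) ≤ pre := by omega
    have hCB : sk ≤ pre := by omega
    by_cases hle : le ≤ 0
    · -- the requested window is empty on both sides
      have hA : PySem.List.slice
          (listLoop d (le + pos) ((le + pos).toNat + 1) s0 []) (some pos) (some (le + pos)) = [] := by
        by_cases h : le + pos < 0
        · rw [listLoop_of_ge d _ _ _ _ (by simp; omega), slice_nil]
        · rw [PySem.List.slice_toNat _ hposnn (by omega),
            show (le + pos).toNat - pos.toNat = 0 by omega, List.take_zero]
      have hB : PySem.List.slice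
          (listLoop d (pre + le - sk) ((pre + le - sk).toNat + 1) nb [])
          (some (pre - sk)) (some (pre + le - sk)) = [] := by
        by_cases h : pre + le - sk < 0
        · rw [listLoop_of_ge d _ _ _ _ (by simp; omega), slice_nil]
        · rw [PySem.List.slice_toNat _ (by omega) (by omega),
            show (pre + le - sk).toNat - (pre - sk).toNat = 0 by omega, List.take_zero]
      rw [hA, hB]
    · push_neg at hle
      rw [show le + pos = pre + le - ((catL d (s0 - 1).toNat).length : Int) by omega,
        show pos = pre - ((catL d (s0 - 1).toNat).length : Int) by omega, hb2]
      exact (window_eq d pre le hd hpre hle s0 hs1 hCA).trans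
        (window_eq d pre le hd hpre hle nb hb1 (by rw [← hb2]; exact hCB)).symm

-- ===== VERDICT (by name: the statement is the Claim_ definition above) =====
theorem solve_spec : Claim_equal_solve := by
  intro d pre le _ hpre
  unfold Spec_solve
  exact solve_eq_alt d pre le hpre
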